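-- pv_equiv track=rewrite | github.com/csn-bot/claw8-skills | markdown2slides/scripts/markdown2slides.py | _split_inner_pipe_row_cells
-- ===== SOURCE A (Python) =====
-- from typing import Iterable, List, Optional, Tuple
--
-- def _split_inner_pipe_row_cells(inner: str) -> List[str]:
--     """
--     Split on ``|`` only **outside** single-backtick `` `...` `` spans.
--
--     Naive ``inner.split('|')`` breaks when a cell uses inline code and the closing
--     `` ` `` was stripped by storage (or never written): the column ``|`` can be
--     parsed as ending the code span. Keeping ``|`` inside an odd backtick run
--     preserves the cell text for ``md_inline_to_html``.
--     """
--     cells: List[str] = []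
--     cur: List[str] = []
--     in_code = False
--     i = 0
--     n = len(inner)
--     while i < n:
--         ch = inner[i]
--         if ch == "`":
--             in_code = not in_code
--             cur.append(ch)
--             i += 1
--         elif ch == "|" and not in_code:
--             cells.append("".join(cur).strip())
--             cur = []
--             i += 1
--         else:
--             cur.append(ch)
--             i += 1
--     cells.append("".join(cur).strip())
--     return cells
-- ===== SOURCE B (Python) =====
-- from typing import List
--
-- def _split_inner_pipe_row_cells(inner: str) -> List[str]:
--     # Split on '`' first: even-indexed parts are outside code spans (split them
--     # on '|'), odd-indexed parts are inside (kept verbatim); re-insert one '`'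
--     # between consecutive parts.
--     parts = inner.split('`')
--     cells: List[str] = []
--     cur = ''
--     odd = False
--     last = len(parts) - 1
--     for idx, part in enumerate(parts):
--         if odd:
--             cur += part
--         else:
--             pieces = part.split('|')
--             cur += pieces[0]
--             for piece in pieces[1:]:
--                 cells.append(cur.strip())
--                 cur = piece
--         if idx != last:
--             cur += '`'
--         odd = not odd
--     cells.append(cur.strip())
--     return cells
-- ===== Notes on version B (the rewrite author's own statement) =====
-- stated objective: faster
-- what changed: Replaces the char-by-char state machine with an in_code flag by a two-level split: split on the backtick once, split only the even-indexed (outside-code) parts on the pipe, re-inserting one backtick between parts.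
import Mathlib
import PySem

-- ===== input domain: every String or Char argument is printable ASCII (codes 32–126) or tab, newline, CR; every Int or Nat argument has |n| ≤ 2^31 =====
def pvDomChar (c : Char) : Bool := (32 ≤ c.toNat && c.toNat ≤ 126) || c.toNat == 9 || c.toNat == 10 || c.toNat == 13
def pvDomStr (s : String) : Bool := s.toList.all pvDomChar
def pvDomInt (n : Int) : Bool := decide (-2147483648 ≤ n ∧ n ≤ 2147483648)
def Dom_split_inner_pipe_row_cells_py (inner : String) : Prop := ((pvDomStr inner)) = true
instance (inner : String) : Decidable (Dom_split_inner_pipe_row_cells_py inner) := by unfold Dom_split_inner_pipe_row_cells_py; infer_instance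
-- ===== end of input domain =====

-- B replaces A's char-by-char in_code state machine by splitting on '`' once and
-- splitting only the even-indexed (outside-code) parts on '|' (alternative decomposition).


-- ===== PORT A =====
-- A's while-loop: state (cells, cur, in_code), one character at a time.
def loopA : List Char → List String → List Char → Bool → List String
  | [], cells, cur, _ => cells ++ [String.ofList (PySem.Chars.strip cur)]
  | c :: rest, cells, cur, inCode =>
    if c = '`' then loopA rest cells (cur ++ [c]) (!inCode)
    else if c = '|' ∧ inCode = false then
      loopA rest (cells ++ [String.ofList (PySem.Chars.strip cur)]) [] inCode
    else loopA rest cells (cur ++ [c]) inCode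

def split_inner_pipe_row_cells_py (inner : String) : List String :=
  loopA inner.toList [] [] false

-- ===== PORT B =====
-- B's inner loop "for piece in pieces[1:]": flush cur, restart from piece.
def flushPieces : List (List Char) → List String → List Char → List String × List Char
  | [], cells, cur => (cells, cur)
  | q :: qs, cells, cur => flushPieces qs (cells ++ [String.ofList (PySem.Chars.strip cur)]) q

-- even-indexed part: pieces = part.split('|'); cur += pieces[0]; flush the rest
def evenStep (p : List Char) (cells : List String) (cur : List Char) :
    List String × List Char :=
  match p.splitOn '|' with
  | [] => (cells, cur)          -- unreachable: split never returns []
  | q :: qs => flushPieces qs cells (cur ++ q)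

-- B's main loop over parts = inner.split('`'); odd = parity flag; '`' re-inserted
-- between consecutive parts (i.e. after every part except the last).
def loopB : List (List Char) → Bool → List String → List Char → List String
  | [], _, cells, cur => cells ++ [String.ofList (PySem.Chars.strip cur)]   -- unreachable: split never returns []
  | [p], odd, cells, cur =>
      let (cells', cur') := if odd then (cells, cur ++ p) else evenStep p cells cur
      cells' ++ [String.ofList (PySem.Chars.strip cur')]
  | p :: p2 :: rest, odd, cells, cur =>
      let (cells', cur') := if odd then (cells, cur ++ p) else evenStep p cells cur
      loopB (p2 :: rest) (!odd) cells' (cur' ++ ['`'])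

def split_inner_pipe_row_cells_py_alt (inner : String) : List String :=
  loopB (inner.toList.splitOn '`') false [] []

-- ===== PRECONDITION & SPEC =====
def Spec_split_inner_pipe_row_cells_py (inner : String) (out : List String) : Prop := out = split_inner_pipe_row_cells_py_alt inner
instance (inner : String) (out : List String) : Decidable (Spec_split_inner_pipe_row_cells_py inner out) := by unfold Spec_split_inner_pipe_row_cells_py; infer_instance

-- ===== CLAIM (what is proved, stated in full; the proofs are below) =====
def Claim_equal_split_inner_pipe_row_cells_py : Prop := ∀ (inner : String), Dom_split_inner_pipe_row_cells_py inner → Spec_split_inner_pipe_row_cells_py inner (split_inner_pipe_row_cells_py inner)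

-- ===== LEMMAS AND PROOFS =====

theorem splitOn_ne_nil {α : Type} [DecidableEq α] (a : α) (l : List α) :
    l.splitOn a ≠ [] := by
  simp [List.splitOn]; exact List.splitOnP_ne_nil _ l

theorem splitOn_cons {α : Type} [DecidableEq α] (a c : α) (l : List α) :
    (c :: l).splitOn a =
      if c = a then [] :: l.splitOn a else (l.splitOn a).modifyHead (c :: ·) := by
  simp only [List.splitOn, List.splitOnP_cons]
  by_cases h : c = a <;> simp [h]

-- even part: a leading '|' flushes cur and restarts from the empty accumulator
theorem evenStep_pipe (p : List Char) (cells : List String) (cur : List Char) :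
    evenStep ('|' :: p) cells cur
      = evenStep p (cells ++ [String.ofList (PySem.Chars.strip cur)]) [] := by
  have h : ('|' :: p).splitOn '|' = [] :: p.splitOn '|' := by
    rw [splitOn_cons]; exact if_pos rfl
  cases hq : p.splitOn '|' with
  | nil => exact absurd hq (splitOn_ne_nil _ _)
  | cons q qs => simp [evenStep, h, hq, flushPieces]

-- even part: a non-'|' head just lands in cur
theorem evenStep_other (c : Char) (hc : c ≠ '|') (p : List Char)
    (cells : List String) (cur : List Char) :
    evenStep (c :: p) cells cur = evenStep p cells (cur ++ [c]) := by
  have h := splitOn_cons '|' c p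
  simp only [if_neg hc] at h
  cases hq : p.splitOn '|' with
  | nil => exact absurd hq (splitOn_ne_nil _ _)
  | cons q qs => simp [evenStep, h, hq, List.modifyHead]

-- lifting a head-modification of the parts list through loopB
theorem loopB_modifyHead_odd (parts : List (List Char)) (hne : parts ≠ [])
    (c : Char) (cells : List String) (cur : List Char) :
    loopB (parts.modifyHead (c :: ·)) true cells cur
      = loopB parts true cells (cur ++ [c]) := by
  match parts with
  | [] => exact absurd rfl hne
  | [p] => simp [loopB, List.modifyHead]
  | p :: p2 :: rest => simp [loopB, List.modifyHead]

theorem loopB_modifyHead_even_pipe (parts : List (List Char)) (hne : parts ≠ [])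
    (cells : List String) (cur : List Char) :
    loopB (parts.modifyHead ('|' :: ·)) false cells cur
      = loopB parts false (cells ++ [String.ofList (PySem.Chars.strip cur)]) [] := by
  match parts with
  | [] => exact absurd rfl hne
  | [p] => simp [loopB, List.modifyHead, evenStep_pipe]
  | p :: p2 :: rest => simp [loopB, List.modifyHead, evenStep_pipe]

theorem loopB_modifyHead_even_other (parts : List (List Char)) (hne : parts ≠ [])
    (c : Char) (hc : c ≠ '|') (cells : List String) (cur : List Char) :
    loopB (parts.modifyHead (c :: ·)) false cells cur
      = loopB parts false cells (cur ++ [c]) := by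
  match parts with
  | [] => exact absurd rfl hne
  | [p] => simp [loopB, List.modifyHead, evenStep_other c hc]
  | p :: p2 :: rest => simp [loopB, List.modifyHead, evenStep_other c hc]

-- the invariant: A's loop from any state equals B's loop on the backtick-split of the rest
theorem loopA_eq_loopB (cs : List Char) :
    ∀ (b : Bool) (cells : List String) (cur : List Char),
      loopA cs cells cur b = loopB (cs.splitOn '`') b cells cur := by
  induction cs with
  | nil =>
    intro b cells cur
    cases b <;> simp [loopA, loopB, List.splitOn, List.splitOnP, List.splitOnP.go,
      evenStep, flushPieces]
  | cons c cs ih =>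
    intro b cells cur
    rw [splitOn_cons]
    by_cases hbt : c = '`'
    · subst hbt
      have hif : (if ('`':Char) = '`' then [] :: cs.splitOn '`'
          else (cs.splitOn '`').modifyHead ('`' :: ·)) = [] :: cs.splitOn '`' := if_pos rfl
      rw [hif]
      cases hq : cs.splitOn '`' with
      | nil => exact absurd hq (splitOn_ne_nil _ _)
      | cons p rest =>
        have : loopB ([] :: p :: rest) b cells cur
            = loopB (p :: rest) (!b) cells (cur ++ ['`']) := by
          cases b <;> simp [loopB, evenStep, List.splitOn, List.splitOnP,
            List.splitOnP.go, flushPieces]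
        rw [this, ← hq, ← ih]
        simp [loopA]
    · rw [if_neg hbt]
      cases b with
      | true =>
        rw [loopB_modifyHead_odd _ (splitOn_ne_nil _ _), ← ih]
        simp [loopA, hbt]
      | false =>
        by_cases hp : c = '|'
        · subst hp
          rw [loopB_modifyHead_even_pipe _ (splitOn_ne_nil _ _), ← ih]
          simp [loopA, hbt]
        · rw [loopB_modifyHead_even_other _ (splitOn_ne_nil _ _) c hp, ← ih]
          simp [loopA, hbt, hp]

-- ===== VERDICT (by name: the statement is the Claim_ definition above) =====
theorem split_inner_pipe_row_cells_py_spec : Claim_equal_split_inner_pipe_row_cells_py := by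
  intro inner _
  unfold Spec_split_inner_pipe_row_cells_py split_inner_pipe_row_cells_py
    split_inner_pipe_row_cells_py_alt
  exact loopA_eq_loopB inner.toList false [] []
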